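-- pv_equiv track=rewrite | github.com/wrgr/neurotrailblazers | scripts/bibliometrics/build_lineage_data.py | compute_generations
-- ===== SOURCE A (Python) =====
-- from collections import defaultdict, deque
--
-- def compute_generations(papers, graph, in_degree, out_degree):
--     """
--     Compute generation/level for each paper based on citation distance.
--
--     Generation = max distance to any leaf node (paper with no outgoing citations).
--     - Generation 0: Papers that don't cite anyone in the corpus
--     - Generation 1: Papers that cite generation 0 papers
--     - etc.
--     """
--     generations = {}
--
--     # BFS from papers with in_degree=0 (foundational papers)
--     # Actually, we want generation based on how deep in citation hierarchy
--     # Generation 0 = foundational (high in_degree, low out_degree)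
--     # Generation N = cites generation N-1 papers
--
--     # Better approach: reverse topological sort
--     # Find papers with out_degree=0 (no citations), mark as generation 0
--     # Then mark papers that cite them as generation 1, etc.
--
--     queue = deque()
--     visited = set()
--
--     # Start with papers that have no outgoing citations (leaves)
--     for paper_id, out_deg in out_degree.items():
--         if out_deg == 0:
--             generations[paper_id] = 0
--             queue.append(paper_id)
--             visited.add(paper_id)
--
--     # BFS backward through citations
--     # For each paper we've processed, mark papers that cite it
--     # as generation = current generation + 1
--     reverse_graph = defaultdict(list)
--     for source, targets in graph.items():
--         for target in targets:
--             reverse_graph[target].append(source)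
--
--     while queue:
--         current_id = queue.popleft()
--         current_gen = generations[current_id]
--
--         # Find papers that cite this one
--         for citing_paper in reverse_graph[current_id]:
--             if citing_paper not in visited:
--                 generations[citing_paper] = current_gen + 1
--                 queue.append(citing_paper)
--                 visited.add(citing_paper)
--
--     # Handle any remaining papers (shouldn't happen in connected component)
--     for paper_id in papers:
--         if paper_id not in generations:
--             generations[paper_id] = 0
--
--     return generations
-- ===== SOURCE B (Python) =====
-- def compute_generations(papers, graph, in_degree, out_degree):
--     """Level-synchronous reverse sweep: no deque and no prebuilt reverse graph;
--     each level's discoverers are found by scanning the forward graph."""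
--     generations = {}
--     visited = set()
--     frontier = [pid for pid, deg in out_degree.items() if deg == 0]
--     for pid in frontier:
--         generations[pid] = 0
--         visited.add(pid)
--     gen = 0
--     while frontier:
--         nxt = []
--         for cited in frontier:
--             for source, targets in graph.items():
--                 if source not in visited and cited in targets:
--                     nxt.append(source)
--                     visited.add(source)
--         gen += 1
--         for s in nxt:
--             generations[s] = gen
--         frontier = nxt
--     for pid in papers:
--         if pid not in generations:
--             generations[pid] = 0
--     return generations
-- ===== Notes on version B (the rewrite author's own statement) =====
-- stated objective: alternative
-- what changed: A's deque-based reverse BFS over an explicitly prebuilt reverse adjacency dict is replaced by a level-synchronous fixpoint sweep that discovers each generation's citers by scanning the forward graph directly, with no queue and no reverse graph.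
import Mathlib
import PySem

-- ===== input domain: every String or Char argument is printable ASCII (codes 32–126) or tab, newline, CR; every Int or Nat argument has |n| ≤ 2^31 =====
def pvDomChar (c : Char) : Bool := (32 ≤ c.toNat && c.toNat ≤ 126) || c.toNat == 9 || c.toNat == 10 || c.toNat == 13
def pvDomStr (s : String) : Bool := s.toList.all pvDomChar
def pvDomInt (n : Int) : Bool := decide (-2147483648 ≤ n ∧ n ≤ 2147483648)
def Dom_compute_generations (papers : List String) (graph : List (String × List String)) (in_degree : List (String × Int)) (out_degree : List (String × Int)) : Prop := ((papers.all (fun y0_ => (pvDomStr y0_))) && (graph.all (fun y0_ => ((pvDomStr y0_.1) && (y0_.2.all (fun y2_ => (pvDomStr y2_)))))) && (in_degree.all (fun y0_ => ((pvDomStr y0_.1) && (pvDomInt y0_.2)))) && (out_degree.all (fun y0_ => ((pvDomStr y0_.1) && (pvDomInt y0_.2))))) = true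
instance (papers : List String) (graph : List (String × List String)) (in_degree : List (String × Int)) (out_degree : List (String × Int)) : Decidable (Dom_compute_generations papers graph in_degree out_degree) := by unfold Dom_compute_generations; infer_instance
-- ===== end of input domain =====

-- B replaces A's deque-based reverse BFS (with an explicitly prebuilt reverse graph) by a
-- level-synchronous sweep that finds each level's citers by scanning the forward graph;
-- objective: alternative (a genuinely different decomposition, not claimed faster).

-- ===== PORT A =====
-- The BFS while-loop, made structural with fuel; the fuel passed below provably suffices
-- (one pop per iteration, at most one enqueue per dict key), so the port is exact.
def pvBfsA (rev : PySem.Dict String (List String)) :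
    Nat → PySem.Dict String Int → List String → PySem.Set String → PySem.Dict String Int
  | 0, gens, _, _ => gens
  | _ + 1, gens, [], _ => gens
  | fuel + 1, gens, c :: rest, vis =>
    let g := gens.getD c 0
    let st := (rev.getD c []).foldl
      (fun (st : PySem.Dict String Int × List String × PySem.Set String) s =>
        if PySem.Set.contains st.2.2 s then st
        else (st.1.insert s (g + 1), st.2.1 ++ [s], PySem.Set.add st.2.2 s))
      (gens, rest, vis)
    pvBfsA rev fuel st.1 st.2.1 st.2.2

def compute_generations (papers : List String) (graph : List (String × List String)) (_in_degree : List (String × Int)) (out_degree : List (String × Int)) : List (String × Int) :=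
  let od := PySem.Dict.ofList out_degree
  let gd := PySem.Dict.ofList graph
  -- for paper_id, out_deg in out_degree.items(): if out_deg == 0: …
  let init := od.items.foldl
    (fun (st : PySem.Dict String Int × List String × PySem.Set String) p =>
      if p.2 == 0 then (st.1.insert p.1 0, st.2.1 ++ [p.1], PySem.Set.add st.2.2 p.1) else st)
    (PySem.Dict.empty, [], PySem.Set.empty)
  -- reverse_graph = defaultdict(list); for source, targets in graph.items(): …
  let rev := gd.items.foldl
    (fun (d : PySem.Dict String (List String)) p =>
      p.2.foldl (fun d t => d.modify t [] (· ++ [p.1])) d) PySem.Dict.empty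
  let gens := pvBfsA rev (od.items.length + 2 * gd.items.length + 1) init.1 init.2.1 init.2.2
  -- for paper_id in papers: if paper_id not in generations: generations[paper_id] = 0
  (papers.foldl (fun g p => if g.contains p then g else g.insert p 0) gens).items

-- ===== PORT B =====
-- one level of B: for cited in frontier: for source, targets in graph.items(): …
def pvExpandB (gitems : List (String × List String)) (frontier : List String)
    (vis : PySem.Set String) : List String × PySem.Set String :=
  frontier.foldl
    (fun st c =>
      gitems.foldl
        (fun (st : List String × PySem.Set String) p =>
          if !(PySem.Set.contains st.2 p.1) && p.2.contains c then
            (st.1 ++ [p.1], PySem.Set.add st.2 p.1)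
          else st) st)
    ([], vis)

-- B's while-loop over frontiers, made structural with fuel (the fuel passed below suffices:
-- every iterated level visits at least one new dict key).
def pvLevelB (gitems : List (String × List String)) :
    Nat → PySem.Dict String Int → List String → PySem.Set String → Int → PySem.Dict String Int
  | 0, gens, _, _, _ => gens
  | _ + 1, gens, [], _, _ => gens
  | fl + 1, gens, frontier, vis, g =>
    let st := pvExpandB gitems frontier vis
    let gens' := st.1.foldl (fun d s => d.insert s (g + 1)) gens
    pvLevelB gitems fl gens' st.1 st.2 (g + 1)

def compute_generations_alt (papers : List String) (graph : List (String × List String)) (_in_degree : List (String × Int)) (out_degree : List (String × Int)) : List (String × Int) :=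
  let od := PySem.Dict.ofList out_degree
  let gd := PySem.Dict.ofList graph
  let frontier := (od.items.filter (fun p => p.2 == 0)).map (·.1)
  let gens0 := frontier.foldl (fun d p => d.insert p 0) PySem.Dict.empty
  let vis0 := frontier.foldl PySem.Set.add PySem.Set.empty
  let gens := pvLevelB gd.items (gd.items.length + 1) gens0 frontier vis0 0
  (papers.foldl (fun g p => if g.contains p then g else g.insert p 0) gens).items

-- ===== PRECONDITION & SPEC =====
def Spec_compute_generations (papers : List String) (graph : List (String × List String)) (in_degree : List (String × Int)) (out_degree : List (String × Int)) (out : List (String × Int)) : Prop := out = compute_generations_alt papers graph in_degree out_degree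
instance (papers : List String) (graph : List (String × List String)) (in_degree : List (String × Int)) (out_degree : List (String × Int)) (out : List (String × Int)) : Decidable (Spec_compute_generations papers graph in_degree out_degree out) := by unfold Spec_compute_generations; infer_instance

-- ===== CLAIM (what is proved, stated in full; the proofs are below) =====
def Claim_equal_compute_generations : Prop := ∀ (papers : List String) (graph : List (String × List String)) (in_degree : List (String × Int)) (out_degree : List (String × Int)), Dom_compute_generations papers graph in_degree out_degree → Spec_compute_generations papers graph in_degree out_degree (compute_generations papers graph in_degree out_degree)

-- ===== LEMMAS AND PROOFS =====

-- The common "discover unvisited nodes" accumulator both ports reduce to.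
def pvCollect (l : List String) (st : List String × PySem.Set String) :
    List String × PySem.Set String :=
  l.foldl (fun st s =>
    if PySem.Set.contains st.2 s then st else (st.1 ++ [s], PySem.Set.add st.2 s)) st

def pvSeq (rev : PySem.Dict String (List String)) (frontier : List String)
    (vis : PySem.Set String) : List String × PySem.Set String :=
  frontier.foldl (fun st c => pvCollect (rev.getD c []) st) ([], vis)

def pvAssign (d : PySem.Dict String Int) (l : List String) (v : Int) : PySem.Dict String Int :=
  l.foldl (fun d s => d.insert s v) d

theorem pvCollect_cons (s : String) (t : List String) (st : List String × PySem.Set String) :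
    pvCollect (s :: t) st =
      pvCollect t (if PySem.Set.contains st.2 s then st
                   else (st.1 ++ [s], PySem.Set.add st.2 s)) := rfl

theorem pvCollect_acc (l : List String) : ∀ (acc : List String) (vis : PySem.Set String),
    pvCollect l (acc, vis) = (acc ++ (pvCollect l ([], vis)).1, (pvCollect l ([], vis)).2) := by
  induction l with
  | nil => intro acc vis; simp [pvCollect]
  | cons s t ih =>
    intro acc vis
    rw [pvCollect_cons, pvCollect_cons]
    by_cases h : PySem.Set.contains vis s = true
    · rw [if_pos h, if_pos h]
      exact ih acc vis
    · rw [if_neg h, if_neg h]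
      simp only [List.nil_append]
      rw [ih (acc ++ [s]), ih [s]]
      simp

theorem pvMemFoldlAdd (l : List String) : ∀ (vis : PySem.Set String) (x : String),
    x ∈ l.foldl PySem.Set.add vis ↔ x ∈ vis ∨ x ∈ l := by
  induction l with
  | nil => simp
  | cons s t ih =>
    intro vis x
    simp [List.foldl_cons, ih, PySem.Set.mem_add]
    tauto

theorem pvCollect_spec (l : List String) : ∀ (vis : PySem.Set String),
    (pvCollect l ([], vis)).2 = (pvCollect l ([], vis)).1.foldl PySem.Set.add vis ∧
    (pvCollect l ([], vis)).1.Nodup ∧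
    (∀ s ∈ (pvCollect l ([], vis)).1, s ∈ l ∧ s ∉ vis) := by
  induction l with
  | nil => intro vis; simp [pvCollect]
  | cons s t ih =>
    intro vis
    rw [pvCollect_cons]
    by_cases h : PySem.Set.contains vis s = true
    · rw [if_pos h]
      obtain ⟨h1, h2, h3⟩ := ih vis
      exact ⟨h1, h2, fun x hx => ⟨List.mem_cons_of_mem _ (h3 x hx).1, (h3 x hx).2⟩⟩
    · rw [if_neg h]
      simp only [List.nil_append]
      obtain ⟨h1, h2, h3⟩ := ih (PySem.Set.add vis s)
      rw [pvCollect_acc]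
      refine ⟨?_, ?_, ?_⟩
      · simp only [List.singleton_append, List.foldl_cons]
        exact h1
      · simp only [List.singleton_append, List.nodup_cons]
        exact ⟨fun hm => (h3 s hm).2 ((PySem.Set.mem_add _ _ _).2 (Or.inr rfl)), h2⟩
      · intro x hx
        rcases List.mem_append.1 hx with hx | hx
        · rcases List.mem_singleton.1 hx with rfl
          exact ⟨List.mem_cons_self, fun hm => h ((PySem.Set.contains_iff _ _).2 hm)⟩
        · exact ⟨List.mem_cons_of_mem _ (h3 x hx).1,
            fun hv => (h3 x hx).2 ((PySem.Set.mem_add _ _ _).2 (Or.inl hv))⟩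

theorem pvAssign_cons (d : PySem.Dict String Int) (s : String) (l : List String) (v : Int) :
    pvAssign d (s :: l) v = pvAssign (d.insert s v) l v := rfl

theorem pvAssign_getD (l : List String) : ∀ (d : PySem.Dict String Int) (v : Int) (x : String) (d0 : Int),
    (pvAssign d l v).getD x d0 = if x ∈ l then v else d.getD x d0 := by
  induction l with
  | nil => simp [pvAssign]
  | cons s t ih =>
    intro d v x d0
    simp only [pvAssign, List.foldl_cons] at ih ⊢
    rw [ih]
    by_cases hx : x ∈ t
    · simp [hx]
    · by_cases hs : x = s <;> simp [hx, hs, PySem.Dict.getD_insert]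

theorem pvCollect_append (l₁ l₂ : List String) (st : List String × PySem.Set String) :
    pvCollect (l₁ ++ l₂) st = pvCollect l₂ (pvCollect l₁ st) := by
  simp [pvCollect, List.foldl_append]

theorem pvAssign_append (d : PySem.Dict String Int) (l₁ l₂ : List String) (v : Int) :
    pvAssign d (l₁ ++ l₂) v = pvAssign (pvAssign d l₁ v) l₂ v := by
  simp [pvAssign, List.foldl_append]

-- reverse-graph characterisation: rev[c] lists, per source (in graph order), one copy of the
-- source for every occurrence of c among its targets.
theorem pvRev_getD (gitems : List (String × List String)) (c : String) :
    (gitems.foldl (fun (d : PySem.Dict String (List String)) p =>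
        p.2.foldl (fun d t => d.modify t [] (· ++ [p.1])) d) PySem.Dict.empty).getD c []
      = gitems.flatMap (fun p => List.replicate (p.2.count c) p.1) := by
  have hb : ∀ (l : List (String × List String)) (d : PySem.Dict String (List String)),
      l.foldl (fun d p => p.2.foldl (fun d t => d.modify t [] (· ++ [p.1])) d) d
        = (l.flatMap (fun p => p.2.map (fun t => (t, p.1)))).foldl
            (fun d q => d.modify q.1 [] (· ++ [q.2])) d := by
    intro l
    induction l with
    | nil => intro d; simp
    | cons p rest ih =>
      intro d
      simp only [List.foldl_cons, List.flatMap_cons, List.foldl_append, ih, List.foldl_map]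
  rw [hb, PySem.Dict.getD_foldl_modify_append]
  simp only [PySem.Dict.getD_empty, List.nil_append]
  rw [List.filter_flatMap, List.map_flatMap]
  congr 1
  funext p
  rw [List.filter_map, List.map_map]
  have hfe : (List.filter ((fun q => q.1 == c) ∘ fun t => (t, p.1)) p.2) = p.2.filter (· == c) := by
    congr 1
  rw [hfe]
  calc (p.2.filter (· == c)).map ((fun (q : String × String) => q.2) ∘ fun t => (t, p.1))
      = (p.2.filter (· == c)).map (fun _ => p.1) := rfl
    _ = List.replicate (p.2.count c) p.1 := by
        rw [List.map_const', List.count_eq_length_filter]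

theorem pvCollect_skip (n : Nat) (s : String) : ∀ (st : List String × PySem.Set String),
    PySem.Set.contains st.2 s = true → pvCollect (List.replicate n s) st = st := by
  induction n with
  | zero => intro st _; rfl
  | succ n ih =>
    intro st h
    rw [List.replicate_succ, pvCollect_cons, if_pos h]
    exact ih st h

theorem pvCollect_replicate (n : Nat) (s : String) (st : List String × PySem.Set String) :
    pvCollect (List.replicate n s) st =
      if n = 0 then st
      else if PySem.Set.contains st.2 s then st else (st.1 ++ [s], PySem.Set.add st.2 s) := by
  cases n with
  | zero => rfl
  | succ n =>
    rw [List.replicate_succ, pvCollect_cons]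
    simp only [Nat.succ_ne_zero, if_false]
    by_cases h : PySem.Set.contains st.2 s = true
    · rw [if_pos h]
      exact pvCollect_skip n s st h
    · rw [if_neg h]
      apply pvCollect_skip
      have : s ∈ PySem.Set.add st.2 s := (PySem.Set.mem_add _ _ _).2 (Or.inr rfl)
      exact (PySem.Set.contains_iff _ _).2 this

-- B's inner scan over the forward graph computes exactly a collect over rev[c].
theorem pvInnerB_flat (gitems : List (String × List String)) (c : String) :
    ∀ (st : List String × PySem.Set String),
    gitems.foldl
      (fun (st : List String × PySem.Set String) p =>
        if !(PySem.Set.contains st.2 p.1) && p.2.contains c then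
          (st.1 ++ [p.1], PySem.Set.add st.2 p.1)
        else st) st
    = pvCollect (gitems.flatMap (fun p => List.replicate (p.2.count c) p.1)) st := by
  induction gitems with
  | nil => intro st; rfl
  | cons p rest ih =>
    intro st
    rw [List.foldl_cons, List.flatMap_cons, pvCollect_append, ← ih, pvCollect_replicate]
    by_cases hc : p.2.contains c = true
    · have hcnt : ¬ p.2.count c = 0 := by
        simp only [List.count_eq_zero]
        exact fun hn => hn (by simpa using hc)
      rw [if_neg hcnt]
      by_cases hv : PySem.Set.contains st.2 p.1 = true
      · rw [if_pos hv]
        have hcond : (!(PySem.Set.contains st.2 p.1) && p.2.contains c) = false := by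
          rw [hv]; rfl
        rw [hcond]; simp
      · rw [if_neg hv]
        have hcond : (!(PySem.Set.contains st.2 p.1) && p.2.contains c) = true := by
          rw [Bool.eq_false_iff.2 hv, hc]; rfl
        rw [hcond]; simp
    · have hcnt : p.2.count c = 0 := by
        rw [List.count_eq_zero]
        simpa using hc
      rw [hcnt, if_pos rfl]
      have hcond : (!(PySem.Set.contains st.2 p.1) && p.2.contains c) = false := by
        rw [Bool.eq_false_iff.2 hc, Bool.and_false]
      rw [hcond]; simp

theorem pvInnerB_eq (gitems : List (String × List String)) (c : String)
    (st : List String × PySem.Set String) :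
    gitems.foldl
      (fun (st : List String × PySem.Set String) p =>
        if !(PySem.Set.contains st.2 p.1) && p.2.contains c then
          (st.1 ++ [p.1], PySem.Set.add st.2 p.1)
        else st) st
    = pvCollect ((gitems.foldl (fun (d : PySem.Dict String (List String)) p =>
        p.2.foldl (fun d t => d.modify t [] (· ++ [p.1])) d) PySem.Dict.empty).getD c []) st := by
  rw [pvRev_getD]
  exact pvInnerB_flat gitems c st

theorem pvExpandB_eq_seq (gitems : List (String × List String)) (frontier : List String)
    (vis : PySem.Set String) :
    pvExpandB gitems frontier vis =
      pvSeq (gitems.foldl (fun (d : PySem.Dict String (List String)) p =>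
        p.2.foldl (fun d t => d.modify t [] (· ++ [p.1])) d) PySem.Dict.empty) frontier vis := by
  have hf : (fun (st : List String × PySem.Set String) (c : String) =>
      gitems.foldl
        (fun (st : List String × PySem.Set String) p =>
          if !(PySem.Set.contains st.2 p.1) && p.2.contains c then
            (st.1 ++ [p.1], PySem.Set.add st.2 p.1)
          else st) st)
      = (fun (st : List String × PySem.Set String) (c : String) =>
          pvCollect ((gitems.foldl (fun (d : PySem.Dict String (List String)) p =>
            p.2.foldl (fun d t => d.modify t [] (· ++ [p.1])) d) PySem.Dict.empty).getD c []) st) := by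
    funext st c
    exact pvInnerB_eq gitems c st
  unfold pvExpandB pvSeq
  rw [hf]

theorem pvSeq_acc (rev : PySem.Dict String (List String)) (frontier : List String) :
    ∀ (acc : List String) (vis : PySem.Set String),
    frontier.foldl (fun st c => pvCollect (rev.getD c []) st) (acc, vis)
      = (acc ++ (pvSeq rev frontier vis).1, (pvSeq rev frontier vis).2) := by
  induction frontier with
  | nil => intro acc vis; simp [pvSeq]
  | cons c rest ih =>
    intro acc vis
    simp only [pvSeq, List.foldl_cons]
    rw [pvCollect_acc (rev.getD c []) acc vis]
    rw [ih]
    have h2 := ih (pvCollect (rev.getD c []) ([], vis)).1 (pvCollect (rev.getD c []) ([], vis)).2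
    rw [show (pvCollect (rev.getD c []) ([], vis)) =
      ((pvCollect (rev.getD c []) ([], vis)).1, (pvCollect (rev.getD c []) ([], vis)).2) from rfl,
      h2]
    simp [pvSeq]

theorem pvSeq_spec (rev : PySem.Dict String (List String)) (frontier : List String) :
    ∀ (vis : PySem.Set String),
    (pvSeq rev frontier vis).2 = (pvSeq rev frontier vis).1.foldl PySem.Set.add vis ∧
    (pvSeq rev frontier vis).1.Nodup ∧
    (∀ s ∈ (pvSeq rev frontier vis).1, (∃ c, s ∈ rev.getD c []) ∧ s ∉ vis) := by
  induction frontier with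
  | nil => intro vis; simp [pvSeq]
  | cons c rest ih =>
    intro vis
    have hstep : pvSeq rev (c :: rest) vis
        = ((pvCollect (rev.getD c []) ([], vis)).1 ++ (pvSeq rev rest (pvCollect (rev.getD c []) ([], vis)).2).1,
           (pvSeq rev rest (pvCollect (rev.getD c []) ([], vis)).2).2) := by
      simp only [pvSeq, List.foldl_cons]
      rw [show (pvCollect (rev.getD c []) ([], vis)) =
        ((pvCollect (rev.getD c []) ([], vis)).1, (pvCollect (rev.getD c []) ([], vis)).2) from rfl,
        pvSeq_acc]
      rfl
    obtain ⟨c1, c2, c3⟩ := pvCollect_spec (rev.getD c []) vis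
    obtain ⟨i1, i2, i3⟩ := ih (pvCollect (rev.getD c []) ([], vis)).2
    rw [hstep]
    refine ⟨?_, ?_, ?_⟩
    · rw [List.foldl_append, ← c1]
      exact i1
    · simp only []
      rw [List.nodup_append]
      refine ⟨c2, i2, ?_⟩
      intro x hx y hy heq
      have hni := (i3 y hy).2
      rw [c1] at hni
      exact hni ((pvMemFoldlAdd _ _ _).2 (Or.inr (heq ▸ hx)))
    · intro x hx
      simp only [List.mem_append] at hx
      rcases hx with hx | hx
      · exact ⟨⟨c, (c3 x hx).1⟩, (c3 x hx).2⟩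
      · refine ⟨(i3 x hx).1, fun hv => ?_⟩
        have := (i3 x hx).2
        rw [c1] at this
        exact this ((pvMemFoldlAdd _ _ _).2 (Or.inl hv))

-- A's inner for-loop over rev[c], with its three pieces of state, decomposes into collect+assign.
theorem pvTriple (l : List String) (g : Int) : ∀ (gens : PySem.Dict String Int) (q : List String)
    (vis : PySem.Set String),
    l.foldl
      (fun (st : PySem.Dict String Int × List String × PySem.Set String) s =>
        if PySem.Set.contains st.2.2 s then st
        else (st.1.insert s (g + 1), st.2.1 ++ [s], PySem.Set.add st.2.2 s))
      (gens, q, vis)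
    = (pvAssign gens (pvCollect l ([], vis)).1 (g + 1),
       q ++ (pvCollect l ([], vis)).1, (pvCollect l ([], vis)).2) := by
  induction l with
  | nil => intro gens q vis; simp [pvCollect, pvAssign]
  | cons s t ih =>
    intro gens q vis
    rw [List.foldl_cons, pvCollect_cons]
    by_cases h : PySem.Set.contains vis s = true
    · rw [if_pos h, if_pos h]
      exact ih gens q vis
    · rw [if_neg h, if_neg h]
      simp only [List.nil_append]
      rw [ih (gens.insert s (g + 1)) (q ++ [s]) (PySem.Set.add vis s)]
      rw [pvCollect_acc t [s] (PySem.Set.add vis s)]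
      simp only []
      rw [← pvAssign_cons, List.append_assoc]
      rfl

theorem pvBfsA_nil (rev : PySem.Dict String (List String)) (F : Nat)
    (gens : PySem.Dict String Int) (vis : PySem.Set String) :
    pvBfsA rev F gens [] vis = gens := by
  cases F <;> simp [pvBfsA]

-- processing one whole level of the queue
theorem pvSeq_cons (rev : PySem.Dict String (List String)) (c : String) (rest : List String)
    (vis : PySem.Set String) :
    pvSeq rev (c :: rest) vis
      = ((pvCollect (rev.getD c []) ([], vis)).1
            ++ (pvSeq rev rest (pvCollect (rev.getD c []) ([], vis)).2).1,
         (pvSeq rev rest (pvCollect (rev.getD c []) ([], vis)).2).2) := by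
  simp only [pvSeq, List.foldl_cons]
  rw [show (pvCollect (rev.getD c []) ([], vis)) =
    ((pvCollect (rev.getD c []) ([], vis)).1, (pvCollect (rev.getD c []) ([], vis)).2) from rfl,
    pvSeq_acc]
  rfl

theorem pvBfsA_cons (rev : PySem.Dict String (List String)) (fuel : Nat)
    (gens : PySem.Dict String Int) (c : String) (rest : List String) (vis : PySem.Set String) :
    pvBfsA rev (fuel + 1) gens (c :: rest) vis
      = pvBfsA rev fuel
          (pvAssign gens (pvCollect (rev.getD c []) ([], vis)).1 (gens.getD c 0 + 1))
          (rest ++ (pvCollect (rev.getD c []) ([], vis)).1)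
          (pvCollect (rev.getD c []) ([], vis)).2 := by
  conv_lhs => rw [pvBfsA]
  rw [pvTriple]

-- processing one whole level of the queue
theorem pvLevelStep (rev : PySem.Dict String (List String)) :
    ∀ (cur nxt : List String) (gens : PySem.Dict String Int) (vis : PySem.Set String)
      (F : Nat) (g : Int),
      (∀ c ∈ cur, c ∈ vis) → (∀ c ∈ cur, gens.getD c 0 = g) →
      pvBfsA rev (F + cur.length) gens (cur ++ nxt) vis
        = pvBfsA rev F (pvAssign gens (pvSeq rev cur vis).1 (g + 1))
            (nxt ++ (pvSeq rev cur vis).1) (pvSeq rev cur vis).2 := by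
  intro cur
  induction cur with
  | nil =>
    intro nxt gens vis F g _ _
    simp [pvSeq, pvAssign]
  | cons c cur' ih =>
    intro nxt gens vis F g hvis hg
    obtain ⟨c1, c2, c3⟩ := pvCollect_spec (rev.getD c []) vis
    have hgc : gens.getD c 0 = g := hg c List.mem_cons_self
    have hq : (c :: cur') ++ nxt = c :: (cur' ++ nxt) := rfl
    have hlen : F + (c :: cur').length = (F + cur'.length) + 1 := by
      simp [List.length_cons]; omega
    rw [hq, hlen, pvBfsA_cons, hgc]
    have hstep := ih (nxt ++ (pvCollect (rev.getD c []) ([], vis)).1)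
      (pvAssign gens (pvCollect (rev.getD c []) ([], vis)).1 (g + 1))
      (pvCollect (rev.getD c []) ([], vis)).2 F g
      (fun x hx => by
        rw [c1, pvMemFoldlAdd]
        exact Or.inl (hvis x (List.mem_cons_of_mem _ hx)))
      (fun x hx => by
        rw [pvAssign_getD]
        have hxv : x ∈ vis := hvis x (List.mem_cons_of_mem _ hx)
        rw [if_neg (fun hmem => (c3 x hmem).2 hxv)]
        exact hg x (List.mem_cons_of_mem _ hx))
    rw [List.append_assoc] at hstep ⊢
    rw [hstep, pvSeq_cons]
    simp only [pvAssign_append]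

theorem pvContainsFalse {X : PySem.Set String} {x : String} (h : x ∉ X) :
    PySem.Set.contains X x = false := by
  cases hc : PySem.Set.contains X x
  · rfl
  · exact absurd ((PySem.Set.contains_iff _ _).1 hc) h

theorem pvUnvisDropOne (U : List String) (s : String) (vis : PySem.Set String)
    (hU : s ∈ U) (hv : s ∉ vis) :
    (U.filter (fun x => !(PySem.Set.contains (PySem.Set.add vis s) x))).length + 1
      ≤ (U.filter (fun x => !(PySem.Set.contains vis x))).length := by
  have hpred : ∀ x ∈ U, (!(PySem.Set.contains (PySem.Set.add vis s) x))
      = ((!(PySem.Set.contains vis x)) && !(x == s)) := by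
    intro x _
    by_cases hxs : x = s
    · subst hxs
      rw [(PySem.Set.contains_iff _ _).2 ((PySem.Set.mem_add _ _ _).2 (Or.inr rfl))]
      simp
    · by_cases hxv : x ∈ vis
      · rw [(PySem.Set.contains_iff _ _).2 ((PySem.Set.mem_add _ _ _).2 (Or.inl hxv)),
          (PySem.Set.contains_iff _ _).2 hxv]
        simp
      · rw [pvContainsFalse hxv,
          pvContainsFalse (fun hm => by
            rcases (PySem.Set.mem_add _ _ _).1 hm with h | h
            · exact hxv h
            · exact hxs h)]
        simp [hxs]
  have hff : U.filter (fun x => (!(PySem.Set.contains vis x)) && !(x == s))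
      = (U.filter (fun x => !(PySem.Set.contains vis x))).filter (fun x => !(x == s)) := by
    rw [List.filter_filter]
    exact List.filter_congr (fun x _ => Bool.and_comm _ _)
  rw [List.filter_congr hpred, hff]
  have hmem : s ∈ U.filter (fun x => !(PySem.Set.contains vis x)) := by
    rw [List.mem_filter]
    exact ⟨hU, by rw [pvContainsFalse hv]; rfl⟩
  have hiff := List.length_filter_lt_length_iff_exists
    (l := U.filter (fun x => !(PySem.Set.contains vis x))) (p := fun x => !(x == s))
  have hlt := hiff.2 ⟨s, hmem, by simp⟩
  omega

theorem pvUnvisDrop (U : List String) :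
    ∀ (new : List String) (vis : PySem.Set String), new.Nodup →
      (∀ s ∈ new, s ∈ U ∧ s ∉ vis) →
      (U.filter (fun x => !(PySem.Set.contains (new.foldl PySem.Set.add vis) x))).length + new.length
        ≤ (U.filter (fun x => !(PySem.Set.contains vis x))).length := by
  intro new
  induction new with
  | nil => intro vis _ _; simp
  | cons s rest ih =>
    intro vis hnd hmem
    have h1 := pvUnvisDropOne U s vis (hmem s List.mem_cons_self).1 (hmem s List.mem_cons_self).2
    have h2 := ih (PySem.Set.add vis s) (List.nodup_cons.1 hnd).2
      (fun x hx => ⟨(hmem x (List.mem_cons_of_mem _ hx)).1, fun hv => by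
        rcases (PySem.Set.mem_add _ _ _).1 hv with h | h
        · exact (hmem x (List.mem_cons_of_mem _ hx)).2 h
        · exact (List.nodup_cons.1 hnd).1 (h ▸ hx)⟩)
    simp only [List.foldl_cons, List.length_cons] at h2 ⊢
    omega

theorem pvRevMem (gitems : List (String × List String)) (c s : String)
    (h : s ∈ (gitems.foldl (fun (d : PySem.Dict String (List String)) p =>
        p.2.foldl (fun d t => d.modify t [] (· ++ [p.1])) d) PySem.Dict.empty).getD c []) :
    s ∈ gitems.map (·.1) := by
  rw [pvRev_getD] at h
  rcases List.mem_flatMap.1 h with ⟨p, hp, hs⟩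
  exact List.mem_map.2 ⟨p, hp, (List.eq_of_mem_replicate hs).symm⟩

theorem pvLevelB_nil (gitems : List (String × List String)) (fl : Nat)
    (gens : PySem.Dict String Int) (vis : PySem.Set String) (g : Int) :
    pvLevelB gitems fl gens [] vis g = gens := by
  cases fl <;> simp [pvLevelB]

theorem pvLevelB_cons (gitems : List (String × List String)) (fl : Nat)
    (gens : PySem.Dict String Int) (c : String) (rest : List String)
    (vis : PySem.Set String) (g : Int) :
    pvLevelB gitems (fl + 1) gens (c :: rest) vis g
      = pvLevelB gitems fl
          (pvAssign gens (pvExpandB gitems (c :: rest) vis).1 (g + 1))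
          (pvExpandB gitems (c :: rest) vis).1
          (pvExpandB gitems (c :: rest) vis).2 (g + 1) := rfl

theorem pvMain (gitems : List (String × List String)) :
    ∀ (n : Nat) (frontier : List String) (gens : PySem.Dict String Int)
      (vis : PySem.Set String) (g : Int) (F fl : Nat),
      ((gitems.map (·.1)).filter (fun x => !(PySem.Set.contains vis x))).length ≤ n →
      (∀ c ∈ frontier, c ∈ vis) → (∀ c ∈ frontier, gens.getD c 0 = g) →
      frontier.length + 2 * n ≤ F → n + 1 ≤ fl →
      pvBfsA (gitems.foldl (fun (d : PySem.Dict String (List String)) p =>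
          p.2.foldl (fun d t => d.modify t [] (· ++ [p.1])) d) PySem.Dict.empty)
        F gens frontier vis
      = pvLevelB gitems fl gens frontier vis g := by
  intro n
  induction n using Nat.strong_induction_on with
  | _ n IH =>
  intro frontier gens vis g F fl hn hsub hg hF hfl
  set rev := gitems.foldl (fun (d : PySem.Dict String (List String)) p =>
      p.2.foldl (fun d t => d.modify t [] (· ++ [p.1])) d) PySem.Dict.empty with hrev
  cases frontier with
  | nil => rw [pvBfsA_nil, pvLevelB_nil]
  | cons c rest =>
    have hlenF : (c :: rest).length ≤ F := by omega
    have hFsplit : (F - (c :: rest).length) + (c :: rest).length = F :=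
      Nat.sub_add_cancel hlenF
    have hstep := pvLevelStep rev (c :: rest) [] gens vis (F - (c :: rest).length) g hsub hg
    rw [List.append_nil, hFsplit] at hstep
    rw [hstep]
    simp only [List.nil_append]
    cases fl with
    | zero => omega
    | succ fl' =>
    rw [pvLevelB_cons, pvExpandB_eq_seq, ← hrev]
    obtain ⟨s1, s2, s3⟩ := pvSeq_spec rev (c :: rest) vis
    have hdrop := pvUnvisDrop (gitems.map (·.1)) (pvSeq rev (c :: rest) vis).1 vis s2
      (fun x hx => ⟨by
          rcases (s3 x hx).1 with ⟨c', hc'⟩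
          exact pvRevMem gitems c' x (by rw [← hrev]; exact hc'), (s3 x hx).2⟩)
    rw [← s1] at hdrop
    by_cases hS : (pvSeq rev (c :: rest) vis).1 = []
    · rw [hS]
      simp only [pvAssign]
      rw [pvBfsA_nil, pvLevelB_nil]
    · have hpos : 1 ≤ (pvSeq rev (c :: rest) vis).1.length :=
        List.length_pos_iff.2 hS
      have hS1n : (pvSeq rev (c :: rest) vis).1.length ≤ n := by omega
      exact IH (n - (pvSeq rev (c :: rest) vis).1.length) (by omega)
        (pvSeq rev (c :: rest) vis).1
        (pvAssign gens (pvSeq rev (c :: rest) vis).1 (g + 1))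
        (pvSeq rev (c :: rest) vis).2 (g + 1)
        (F - (c :: rest).length) fl'
        (by omega)
        (fun x hx => by rw [s1]; exact (pvMemFoldlAdd _ _ _).2 (Or.inr hx))
        (fun x hx => by rw [pvAssign_getD, if_pos hx])
        (by omega) (by omega)

-- the initialisation loop of A produces B's frontier / gens0 / vis0
theorem pvInit (items : List (String × Int)) :
    ∀ (st : PySem.Dict String Int × List String × PySem.Set String),
      items.foldl
        (fun (st : PySem.Dict String Int × List String × PySem.Set String) p =>
          if p.2 == 0 then (st.1.insert p.1 0, st.2.1 ++ [p.1], PySem.Set.add st.2.2 p.1) else st)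
        st
      = (pvAssign st.1 ((items.filter (fun p => p.2 == 0)).map (·.1)) 0,
         st.2.1 ++ (items.filter (fun p => p.2 == 0)).map (·.1),
         ((items.filter (fun p => p.2 == 0)).map (·.1)).foldl PySem.Set.add st.2.2) := by
  induction items with
  | nil => intro st; simp [pvAssign]
  | cons p rest ih =>
    intro st
    rw [List.foldl_cons]
    by_cases h : (p.2 == 0) = true
    · rw [if_pos h, ih]
      simp [h, pvAssign_cons, List.append_assoc]
    · rw [if_neg h, ih]
      simp [h]

-- ===== VERDICT (by name: the statement is the Claim_ definition above) =====
theorem compute_generations_spec : Claim_equal_compute_generations := by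
  intro papers graph in_degree out_degree _
  show compute_generations papers graph in_degree out_degree
      = compute_generations_alt papers graph in_degree out_degree
  unfold compute_generations compute_generations_alt
  simp only [pvInit]
  refine congrArg (fun (d : PySem.Dict String Int) =>
    (papers.foldl (fun (g : PySem.Dict String Int) p =>
      if g.contains p then g else g.insert p 0) d).items) ?_
  set od := PySem.Dict.ofList out_degree
  set gd := PySem.Dict.ofList graph
  set frontier := (od.items.filter (fun p => p.2 == 0)).map (·.1) with hfr
  set vis0 := frontier.foldl PySem.Set.add PySem.Set.empty with hvis0
  have hfrlen : frontier.length ≤ od.items.length := by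
    rw [hfr, List.length_map]
    exact List.length_filter_le _ _
  have hUlen : ((gd.items.map (·.1)).filter
      (fun x => !(PySem.Set.contains vis0 x))).length ≤ gd.items.length := by
    calc ((gd.items.map (·.1)).filter (fun x => !(PySem.Set.contains vis0 x))).length
        ≤ (gd.items.map (·.1)).length := List.length_filter_le _ _
      _ = gd.items.length := List.length_map _
  exact pvMain gd.items
    ((gd.items.map (·.1)).filter (fun x => !(PySem.Set.contains vis0 x))).length
    frontier (pvAssign PySem.Dict.empty frontier 0) vis0 0
    (od.items.length + 2 * gd.items.length + 1) (gd.items.length + 1)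
    le_rfl
    (fun c hc => (pvMemFoldlAdd _ _ _).2 (Or.inr hc))
    (fun c hc => by rw [pvAssign_getD, if_pos hc])
    (by omega) (by omega)
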